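-- pv_equiv track=rewrite | github.com/HxCodeWarrior/StellarByte | datasets.py | _find_token_sequence
-- ===== SOURCE A (Python) =====
-- from typing import List, Optional, Callable
--
-- def _find_token_sequence(pattern: List[int], arr: List[int]) -> List[int]:
--     """
--     使用 KMP 在线性时间内查找 `pattern` 在 `arr` 中所有出现的起始索引。
--
--     参数
--     ----
--     pattern : 要匹配的子串（token id 列表）
--     arr     : 目标序列
--
--     返回
--     ----
--     List[int] : 所有匹配起点，升序排列
--     """
--     if not pattern or len(pattern) > len(arr):
--         return []
--
--     # ---------- 1. 预处理前缀函数（最长真前后缀） ----------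
--     lps = [0] * len(pattern)
--     j   = 0
--     for i in range(1, len(pattern)):
--         while j and pattern[i] != pattern[j]:
--             j = lps[j - 1]
--         if pattern[i] == pattern[j]:
--             j += 1
--             lps[i] = j
--
--     # ---------- 2. 主串匹配 ----------
--     res, j = [], 0
--     for idx, token in enumerate(arr):
--         while j and token != pattern[j]:
--             j = lps[j - 1]
--         if token == pattern[j]:
--             j += 1
--             if j == len(pattern):
--                 res.append(idx - j + 1)  # 记录起点
--                 j = lps[j - 1]           # 继续寻找下一个
--     return res
-- ===== SOURCE B (Python) =====
-- def _find_token_sequence(pattern, arr):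
--     """Naive sliding-window matcher: try every start, compare the window."""
--     if not pattern or len(pattern) > len(arr):
--         return []
--     m = len(pattern)
--     return [i for i in range(len(arr) - m + 1) if arr[i:i + m] == pattern]
-- ===== Notes on version B (the rewrite author's own statement) =====
-- stated objective: simpler
-- what changed: Replaced the KMP automaton (prefix-function table plus failure-link scan) with a naive sliding-window matcher that compares the slice arr[i:i+m] with the pattern at every start index.
import Mathlib
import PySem

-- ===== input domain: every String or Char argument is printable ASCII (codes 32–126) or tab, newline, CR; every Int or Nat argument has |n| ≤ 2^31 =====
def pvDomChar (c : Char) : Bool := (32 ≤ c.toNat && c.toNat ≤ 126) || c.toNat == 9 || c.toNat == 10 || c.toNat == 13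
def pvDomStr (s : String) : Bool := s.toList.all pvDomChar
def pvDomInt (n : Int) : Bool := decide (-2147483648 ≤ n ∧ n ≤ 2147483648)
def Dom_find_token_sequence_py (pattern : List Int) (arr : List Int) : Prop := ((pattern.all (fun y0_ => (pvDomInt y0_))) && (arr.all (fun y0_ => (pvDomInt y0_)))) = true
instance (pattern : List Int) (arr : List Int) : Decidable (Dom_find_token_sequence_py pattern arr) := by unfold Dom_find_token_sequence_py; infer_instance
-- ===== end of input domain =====

-- B replaces A's KMP automaton (prefix table + failure links) by a naive sliding-window
-- matcher (compare arr[i:i+m] with pattern at every start); simpler (and measured faster in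
-- CPython in a timing run, since slice comparison runs at C level).

-- ===== PORT A =====
-- the `while j and token != pattern[j]: j = lps[j-1]` loop; fuel = current j suffices
-- because each step strictly decreases j (lps[j-1] < j)
def pvFall (pat : List Int) (lps : List Nat) (c : Int) : Nat → Nat → Nat
  | 0, j => j
  | fuel + 1, j =>
    if j ≠ 0 ∧ c ≠ pat.getD j 0 then pvFall pat lps c fuel (lps.getD (j - 1) 0) else j

-- one iteration of the prefix-function loop, state = (lps, j)
def pvLpsStep (pat : List Int) (st : List Nat × Nat) (i : Nat) : List Nat × Nat :=
  let j1 := pvFall pat st.1 (pat.getD i 0) st.2 st.2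
  if pat.getD i 0 = pat.getD j1 0 then (st.1.set i (j1 + 1), j1 + 1) else (st.1, j1)

-- lps = [0]*m ; for i in range(1, m): …
def pvBuildLps (pat : List Int) : List Nat :=
  ((List.range' 1 (pat.length - 1)).foldl (pvLpsStep pat) (List.replicate pat.length 0, 0)).1

-- for idx, token in enumerate(arr): … (state: idx, j, res)
def pvScan (pat : List Int) (lps : List Nat) : List Int → Nat → Nat → List Int → List Int
  | [], _, _, res => res
  | c :: rest, idx, j, res =>
    let j1 := pvFall pat lps c j j
    if c = pat.getD j1 0 then
      if j1 + 1 = pat.length then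
        pvScan pat lps rest (idx + 1) (lps.getD (j1 + 1 - 1) 0)
          (res ++ [((idx : Int) - ((j1 + 1 : Nat) : Int) + 1)])
      else pvScan pat lps rest (idx + 1) (j1 + 1) res
    else pvScan pat lps rest (idx + 1) j1 res

def find_token_sequence_py (pattern : List Int) (arr : List Int) : List Int :=
  if pattern = [] ∨ arr.length < pattern.length then []
  else pvScan pattern (pvBuildLps pattern) arr 0 0 []

-- ===== PORT B =====
def find_token_sequence_py_alt (pattern : List Int) (arr : List Int) : List Int :=
  if pattern = [] ∨ arr.length < pattern.length then []
  else
    (List.range (arr.length - pattern.length + 1)).filterMap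
      (fun (i : Nat) =>
        if PySem.List.slice arr (some (i : Int)) (some ((i : Int) + (pattern.length : Int))) = pattern
        then some (i : Int) else none)

-- ===== PRECONDITION & SPEC =====
def Spec_find_token_sequence_py (pattern : List Int) (arr : List Int) (out : List Int) : Prop := out = find_token_sequence_py_alt pattern arr
instance (pattern : List Int) (arr : List Int) (out : List Int) : Decidable (Spec_find_token_sequence_py pattern arr out) := by unfold Spec_find_token_sequence_py; infer_instance

-- ===== CLAIM (what is proved, stated in full; the proofs are below) =====
def Claim_equal_find_token_sequence_py : Prop := ∀ (pattern : List Int) (arr : List Int), Dom_find_token_sequence_py pattern arr → Spec_find_token_sequence_py pattern arr (find_token_sequence_py pattern arr)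

-- ===== LEMMAS AND PROOFS =====

-- pvM pat t K = length of the longest prefix of pat, of length ≤ K, that is a suffix of t
def pvM (pat t : List Int) (K : Nat) : Nat := Nat.findGreatest (fun k => pat.take k <:+ t) K

-- lps is correct below K: lps[i] = longest proper border of pat[:i+1]
def LpsOk (pat : List Int) (lps : List Nat) (K : Nat) : Prop :=
  ∀ i, i < K → lps.getD i 0 = pvM pat (pat.take (i + 1)) i

-- spec of the whole scan, accumulated left to right: one entry per match end
def pvG (pat t rest : List Int) : List Int :=
  match rest with
  | [] => []
  | c :: rest =>
    (if pat <:+ t ++ [c] then [((t.length : Int) - (pat.length : Int) + 1)] else [])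
      ++ pvG pat (t ++ [c]) rest

theorem pv_suffix_of_suffix_le {α : Type} {s₁ s₂ t : List α} (h1 : s₁ <:+ t) (h2 : s₂ <:+ t)
    (h : s₁.length ≤ s₂.length) : s₁ <:+ s₂ := by
  rw [← List.reverse_prefix] at h1 h2 ⊢
  exact List.prefix_of_prefix_length_le h1 h2 (by simpa using h)

theorem pv_append_singleton_suffix {α : Type} {xs ys : List α} {a b : α} :
    xs ++ [a] <:+ ys ++ [b] ↔ xs <:+ ys ∧ a = b := by
  rw [← List.reverse_prefix, ← List.reverse_prefix (l₁ := xs)]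
  simp [List.cons_prefix_cons, and_comm]

theorem pv_take_succ_eq {pat : List Int} {k : Nat} (h : k < pat.length) :
    pat.take (k + 1) = pat.take k ++ [pat.getD k 0] := by
  rw [List.take_add_one]
  simp [List.getElem?_eq_getElem h, List.getD_eq_getElem?_getD]

theorem pv_ext_iff {pat t : List Int} {c : Int} {k : Nat} (hk : k < pat.length) :
    pat.take (k + 1) <:+ t ++ [c] ↔ pat.take k <:+ t ∧ pat.getD k 0 = c := by
  rw [pv_take_succ_eq hk, pv_append_singleton_suffix]

theorem pvM_suffix (pat t : List Int) (K : Nat) : pat.take (pvM pat t K) <:+ t := by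
  unfold pvM
  refine Nat.findGreatest_spec (P := fun k => pat.take k <:+ t) (m := 0) (Nat.zero_le _) ?_
  simp

theorem pvM_le (pat t : List Int) (K : Nat) : pvM pat t K ≤ K := Nat.findGreatest_le K

theorem le_pvM {pat t : List Int} {K k : Nat} (h : k ≤ K) (hs : pat.take k <:+ t) :
    k ≤ pvM pat t K := Nat.le_findGreatest h hs

theorem pvM_eq_of {pat t : List Int} {K j : Nat} (h1 : j ≤ K) (h2 : pat.take j <:+ t)
    (h3 : ∀ k, k ≤ K → pat.take k <:+ t → k ≤ j) : pvM pat t K = j :=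
  le_antisymm (h3 _ (pvM_le pat t K) (pvM_suffix pat t K)) (le_pvM h1 h2)

theorem pvM_mono_eq {pat t : List Int} {K K' : Nat} (h : pvM pat t K ≤ K') (h2 : K' ≤ K) :
    pvM pat t K' = pvM pat t K :=
  pvM_eq_of h (pvM_suffix pat t K) (fun _ hk hs => le_pvM (hk.trans h2) hs)

theorem pvM_nil {pat : List Int} {K : Nat} (hp : pat ≠ []) : pvM pat [] K = 0 := by
  unfold pvM
  rw [Nat.findGreatest_eq_zero_iff]
  intro n hn _ hs
  rw [List.suffix_nil, List.take_eq_nil_iff] at hs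
  rcases hs with h | h
  · omega
  · exact hp h

theorem pvM_congr {pat t₁ t₂ : List Int} {K : Nat}
    (h : ∀ k, k ≤ K → (pat.take k <:+ t₁ ↔ pat.take k <:+ t₂)) :
    pvM pat t₁ K = pvM pat t₂ K :=
  pvM_eq_of (pvM_le pat t₂ K) ((h _ (pvM_le pat t₂ K)).2 (pvM_suffix pat t₂ K))
    (fun k hk hs => le_pvM hk ((h k hk).1 hs))

theorem getD_set_self' {l : List Nat} {i v : Nat} (h : i < l.length) :
    (l.set i v).getD i 0 = v := by
  simp [List.getD_eq_getElem?_getD, List.getElem?_set_self h]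

theorem getD_set_ne' {l : List Nat} {i k v : Nat} (h : i ≠ k) :
    (l.set i v).getD k 0 = l.getD k 0 := by
  simp [List.getD_eq_getElem?_getD, List.getElem?_set_ne h]

theorem pvFall_spec (pat : List Int) (lps : List Nat) (c : Int) (K : Nat) (hl : LpsOk pat lps K) :
    ∀ fuel j, j ≤ fuel → j ≤ K →
      pvFall pat lps c fuel j ≤ j ∧
      pat.take (pvFall pat lps c fuel j) <:+ pat.take j ∧
      (pvFall pat lps c fuel j = 0 ∨ c = pat.getD (pvFall pat lps c fuel j) 0) ∧
      (∀ k, k ≤ j → pat.take k <:+ pat.take j → c = pat.getD k 0 → k ≤ pvFall pat lps c fuel j) := by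
  intro fuel
  induction fuel with
  | zero =>
    intro j hj _
    have hj0 : j = 0 := by omega
    subst hj0
    exact ⟨le_rfl, List.suffix_refl _, Or.inl rfl, fun k hk _ _ => hk⟩
  | succ fuel ih =>
    intro j hj hjK
    by_cases hcond : j ≠ 0 ∧ c ≠ pat.getD j 0
    · have hj0 : j ≠ 0 := hcond.1
      have hlj : lps.getD (j - 1) 0 = pvM pat (pat.take j) (j - 1) := by
        have hx := hl (j - 1) (by omega)
        rwa [Nat.sub_add_cancel (by omega)] at hx
      have hstep : pvFall pat lps c (fuel + 1) j = pvFall pat lps c fuel (lps.getD (j - 1) 0) := by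
        simp only [pvFall, if_pos hcond]
      have hj'le : lps.getD (j - 1) 0 ≤ j - 1 := by rw [hlj]; exact pvM_le _ _ _
      obtain ⟨ha, hb, hc2, hd⟩ := ih (lps.getD (j - 1) 0) (by omega) (by omega)
      have hsufj' : pat.take (lps.getD (j - 1) 0) <:+ pat.take j := by
        rw [hlj]; exact pvM_suffix _ _ _
      rw [hstep]
      refine ⟨by omega, hb.trans hsufj', hc2, ?_⟩
      intro k hk hks hkc
      have hkj : k ≠ j := by rintro rfl; exact hcond.2 hkc
      have hkle : k ≤ lps.getD (j - 1) 0 := by rw [hlj]; exact le_pvM (by omega) hks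
      have hks' : pat.take k <:+ pat.take (lps.getD (j - 1) 0) := by
        apply pv_suffix_of_suffix_le hks hsufj'
        simp only [List.length_take]
        omega
      exact hd k hkle hks' hkc
    · have hstep : pvFall pat lps c (fuel + 1) j = j := by
        simp only [pvFall, if_neg hcond]
      rw [hstep]
      refine ⟨le_rfl, List.suffix_refl _, ?_, fun k hk _ _ => hk⟩
      by_cases h0 : j = 0
      · exact Or.inl h0
      · refine Or.inr (by_contra fun hcc => hcond ⟨h0, hcc⟩)

theorem pvStep (pat t : List Int) (c : Int) (lps : List Nat) (K : Nat)
    (hK : K + 1 ≤ pat.length) (hl : LpsOk pat lps K) :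
    (c = pat.getD (pvFall pat lps c (pvM pat t K) (pvM pat t K)) 0 →
      pvM pat (t ++ [c]) (K + 1) = pvFall pat lps c (pvM pat t K) (pvM pat t K) + 1) ∧
    (c ≠ pat.getD (pvFall pat lps c (pvM pat t K) (pvM pat t K)) 0 →
      pvFall pat lps c (pvM pat t K) (pvM pat t K) = 0 ∧ pvM pat (t ++ [c]) (K + 1) = 0) := by
  obtain ⟨ha, hb, hstop, hmax⟩ := pvFall_spec pat lps c K hl (pvM pat t K) (pvM pat t K)
    le_rfl (pvM_le pat t K)
  have hjK : pvM pat t K ≤ K := pvM_le pat t K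
  have hjt : pat.take (pvM pat t K) <:+ t := pvM_suffix pat t K
  constructor
  · intro hc
    apply pvM_eq_of (by omega)
    · rw [pv_ext_iff (by omega)]
      exact ⟨hb.trans hjt, hc.symm⟩
    · intro k hk hks
      match k with
      | 0 => exact Nat.zero_le _
      | k' + 1 =>
        rw [pv_ext_iff (by omega)] at hks
        obtain ⟨hks', hkc⟩ := hks
        have hk'j : k' ≤ pvM pat t K := le_pvM (by omega) hks'
        have hsk : pat.take k' <:+ pat.take (pvM pat t K) := by
          apply pv_suffix_of_suffix_le hks' hjt
          simp only [List.length_take]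
          omega
        have := hmax k' hk'j hsk hkc.symm
        omega
  · intro hc
    have hj10 : pvFall pat lps c (pvM pat t K) (pvM pat t K) = 0 := by
      rcases hstop with h | h
      · exact h
      · exact absurd h hc
    refine ⟨hj10, ?_⟩
    apply pvM_eq_of (Nat.zero_le _) (by simp)
    intro k hk hks
    match k with
    | 0 => exact le_rfl
    | k' + 1 =>
      rw [pv_ext_iff (by omega)] at hks
      obtain ⟨hks', hkc⟩ := hks
      have hk'j : k' ≤ pvM pat t K := le_pvM (by omega) hks'
      have hsk : pat.take k' <:+ pat.take (pvM pat t K) := by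
        apply pv_suffix_of_suffix_le hks' hjt
        simp only [List.length_take]
        omega
      have hk'le := hmax k' hk'j hsk hkc.symm
      have hk0 : k' = 0 := by omega
      subst hk0
      exact absurd (hj10 ▸ hkc.symm) hc

theorem pvScan_eq (pat : List Int) (lps : List Nat) (hm : 0 < pat.length)
    (hl : LpsOk pat lps pat.length) :
    ∀ rest t res, pvScan pat lps rest t.length (pvM pat t (pat.length - 1)) res
      = res ++ pvG pat t rest := by
  intro rest
  induction rest with
  | nil => intro t res; simp [pvScan, pvG]
  | cons c rest ih =>
    intro t res
    have hl' : LpsOk pat lps (pat.length - 1) := fun i hi => hl i (by omega)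
    have hstep := pvStep pat t c lps (pat.length - 1) (by omega) hl'
    rw [Nat.sub_add_cancel hm] at hstep
    obtain ⟨h1, hb, hstop, hmax⟩ := pvFall_spec pat lps c (pat.length - 1) hl'
      (pvM pat t (pat.length - 1)) (pvM pat t (pat.length - 1)) le_rfl (pvM_le _ _ _)
    have hjK : pvM pat t (pat.length - 1) ≤ pat.length - 1 := pvM_le _ _ _
    simp only [pvScan, pvG]
    by_cases hc : c = pat.getD (pvFall pat lps c (pvM pat t (pat.length - 1)) (pvM pat t (pat.length - 1))) 0
    · rw [if_pos hc]
      by_cases hfull : pvFall pat lps c (pvM pat t (pat.length - 1)) (pvM pat t (pat.length - 1)) + 1 = pat.length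
      · rw [if_pos hfull]
        have hM : pvM pat (t ++ [c]) pat.length = pat.length := by rw [hstep.1 hc, hfull]
        have hsuf : pat <:+ t ++ [c] := by
          have hx := pvM_suffix pat (t ++ [c]) pat.length
          rwa [hM, List.take_length] at hx
        have hreset : lps.getD (pvFall pat lps c (pvM pat t (pat.length - 1)) (pvM pat t (pat.length - 1)) + 1 - 1) 0
            = pvM pat (t ++ [c]) (pat.length - 1) := by
          have h1x : pvFall pat lps c (pvM pat t (pat.length - 1)) (pvM pat t (pat.length - 1)) + 1 - 1 = pat.length - 1 := by omega
          rw [h1x, hl (pat.length - 1) (by omega), Nat.sub_add_cancel hm, List.take_length]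
          apply pvM_congr
          intro k hk
          constructor
          · intro hkp
            exact hkp.trans hsuf
          · intro hkt
            apply pv_suffix_of_suffix_le hkt hsuf
            simp only [List.length_take]
            omega
        rw [hreset]
        have hIH := ih (t ++ [c])
          (res ++ [((t.length : Int) - ((pvFall pat lps c (pvM pat t (pat.length - 1)) (pvM pat t (pat.length - 1)) + 1 : Nat) : Int) + 1)])
        simp only [List.length_append, List.length_cons, List.length_nil] at hIH
        rw [hIH, if_pos hsuf, hfull]
        simp [List.append_assoc]
      · rw [if_neg hfull]
        have hM : pvM pat (t ++ [c]) pat.length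
            = pvFall pat lps c (pvM pat t (pat.length - 1)) (pvM pat t (pat.length - 1)) + 1 := hstep.1 hc
        have hinv : pvM pat (t ++ [c]) (pat.length - 1)
            = pvFall pat lps c (pvM pat t (pat.length - 1)) (pvM pat t (pat.length - 1)) + 1 := by
          rw [← hM]
          exact pvM_mono_eq (by rw [hM]; omega) (by omega)
        have hnot : ¬ pat <:+ t ++ [c] := by
          intro hsuf
          have hx : pat.length ≤ pvM pat (t ++ [c]) pat.length :=
            le_pvM (le_refl _) (by rw [List.take_length]; exact hsuf)
          omega
        rw [if_neg hnot]
        have hIH := ih (t ++ [c]) res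
        simp only [List.length_append, List.length_cons, List.length_nil] at hIH
        rw [hinv] at hIH
        rw [hIH]
        simp
    · rw [if_neg hc]
      obtain ⟨hj10, hM0⟩ := hstep.2 hc
      have hinv : pvM pat (t ++ [c]) (pat.length - 1) = 0 := by
        rw [← hM0]
        exact pvM_mono_eq (by rw [hM0]; omega) (by omega)
      have hnot : ¬ pat <:+ t ++ [c] := by
        intro hsuf
        have hx : pat.length ≤ pvM pat (t ++ [c]) pat.length :=
          le_pvM (le_refl _) (by rw [List.take_length]; exact hsuf)
        omega
      rw [if_neg hnot, hj10]
      have hIH := ih (t ++ [c]) res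
      simp only [List.length_append, List.length_cons, List.length_nil] at hIH
      rw [hinv] at hIH
      rw [hIH]
      simp

theorem pvG_eq (pat arr0 : List Int) : ∀ rest t, t ++ rest = arr0 →
    pvG pat t rest = (List.range' t.length rest.length).filterMap
      (fun e => if pat <:+ arr0.take (e + 1) then some ((e : Int) - (pat.length : Int) + 1)
                else none) := by
  intro rest
  induction rest with
  | nil => intro t h; simp [pvG]
  | cons c rest ih =>
    intro t h
    have htake : arr0.take (t.length + 1) = t ++ [c] := by
      rw [← h, List.take_append, List.take_of_length_le (by omega), Nat.add_sub_cancel_left]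
      simp
    have hIH := ih (t ++ [c]) (by simpa using h)
    simp only [List.length_append, List.length_cons, List.length_nil] at hIH
    simp only [pvG, List.length_cons, List.range'_succ, List.filterMap_cons, htake, hIH]
    by_cases hs : pat <:+ t ++ [c]
    · rw [if_pos hs, if_pos hs]
      simp
    · rw [if_neg hs, if_neg hs]
      simp

theorem pv_cond_iff (pat arr : List Int) (_hm : 0 < pat.length) (e : Nat) (he : e < arr.length) :
    (pat <:+ arr.take (e + 1)) ↔
      (pat.length ≤ e + 1 ∧ (arr.drop (e + 1 - pat.length)).take pat.length = pat) := by
  have hsplit : arr.take (e + 1)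
      = arr.take (e + 1 - pat.length) ++ (arr.drop (e + 1 - pat.length)).take pat.length
      ∨ e + 1 < pat.length := by
    by_cases hlen : pat.length ≤ e + 1
    · left
      have hx := List.take_add (l := arr) (i := e + 1 - pat.length) (j := pat.length)
      rwa [show e + 1 - pat.length + pat.length = e + 1 from by omega] at hx
    · right; omega
  constructor
  · intro hsuf
    have hlen : pat.length ≤ e + 1 := by
      have hx := hsuf.length_le
      simp only [List.length_take] at hx
      omega
    rcases hsplit with hsp | hsp
    · refine ⟨hlen, ?_⟩
      have hY : ((arr.drop (e + 1 - pat.length)).take pat.length).length = pat.length := by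
        simp only [List.length_take, List.length_drop]
        omega
      rw [hsp] at hsuf
      have h2 : pat <:+ (arr.drop (e + 1 - pat.length)).take pat.length :=
        pv_suffix_of_suffix_le hsuf (List.suffix_append _ _) (by rw [hY])
      exact (h2.eq_of_length (by rw [hY])).symm
    · omega
  · rintro ⟨hlen, hY⟩
    rcases hsplit with hsp | hsp
    · rw [hsp]
      rw [hY]
      exact List.suffix_append _ _
    · omega

theorem pvBuildLps_inv (pat : List Int) (hm : 0 < pat.length) : ∀ p, p ≤ pat.length - 1 →
    (((List.range' 1 p).foldl (pvLpsStep pat) (List.replicate pat.length 0, 0)).1.length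
        = pat.length) ∧
    LpsOk pat ((List.range' 1 p).foldl (pvLpsStep pat) (List.replicate pat.length 0, 0)).1 (p + 1) ∧
    (∀ i', p + 1 ≤ i' →
      ((List.range' 1 p).foldl (pvLpsStep pat) (List.replicate pat.length 0, 0)).1.getD i' 0 = 0) ∧
    ((List.range' 1 p).foldl (pvLpsStep pat) (List.replicate pat.length 0, 0)).2
      = pvM pat (pat.take (p + 1)) p := by
  intro p
  induction p with
  | zero =>
    intro _
    refine ⟨by simp, ?_, ?_, by simp [pvM]⟩
    · intro i hi
      have hi0 : i = 0 := by omega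
      subst hi0
      simp [pvM, hm]
    · intro i' _
      simp only [List.range'_zero, List.foldl_nil, List.getD_eq_getElem?_getD,
        List.getElem?_replicate]
      split <;> rfl
  | succ p ihp =>
    intro hp
    obtain ⟨hlen, hLps, hzero, hst2⟩ := ihp (by omega)
    set st := (List.range' 1 p).foldl (pvLpsStep pat) (List.replicate pat.length 0, 0) with hstdef
    have hfold : (List.range' 1 (p + 1)).foldl (pvLpsStep pat) (List.replicate pat.length 0, 0)
        = pvLpsStep pat st (1 + p) := by
      rw [List.range'_concat, List.foldl_append]
      simp only [List.foldl_cons, List.foldl_nil, Nat.one_mul, ← hstdef]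
    rw [hfold, Nat.add_comm 1 p]
    have hl' : LpsOk pat st.1 p := fun i hi => hLps i (by omega)
    have hstep := pvStep pat (pat.take (p + 1)) (pat.getD (p + 1) 0) st.1 p (by omega) hl'
    have htk : pat.take (p + 1) ++ [pat.getD (p + 1) 0] = pat.take (p + 1 + 1) :=
      (pv_take_succ_eq (by omega)).symm
    rw [htk, ← hst2] at hstep
    simp only [pvLpsStep]
    by_cases hc : pat.getD (p + 1) 0
        = pat.getD (pvFall pat st.1 (pat.getD (p + 1) 0) st.2 st.2) 0
    · rw [if_pos hc]
      have hM := hstep.1 hc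
      refine ⟨by simp [hlen], ?_, ?_, hM.symm⟩
      · intro i hi
        by_cases hip : i = p + 1
        · subst hip
          rw [getD_set_self' (by rw [hlen]; omega)]
          exact hM.symm
        · rw [getD_set_ne' (fun hx => hip hx.symm)]
          exact hLps i (by omega)
      · intro i' hi'
        rw [getD_set_ne' (by omega)]
        exact hzero i' (by omega)
    · rw [if_neg hc]
      obtain ⟨hj10, hM0⟩ := hstep.2 hc
      refine ⟨hlen, ?_, fun i' hi' => hzero i' (by omega), by rw [hj10]; exact hM0.symm⟩
      intro i hi
      by_cases hip : i = p + 1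
      · subst hip
        rw [hzero (p + 1) le_rfl]
        exact hM0.symm
      · exact hLps i (by omega)

theorem pvBuildLps_ok (pat : List Int) (hm : 0 < pat.length) :
    LpsOk pat (pvBuildLps pat) pat.length := by
  have h := (pvBuildLps_inv pat hm (pat.length - 1) le_rfl).2.1
  unfold pvBuildLps
  rwa [Nat.sub_add_cancel hm] at h

theorem pv_main (pattern arr : List Int) :
    find_token_sequence_py pattern arr = find_token_sequence_py_alt pattern arr := by
  unfold find_token_sequence_py find_token_sequence_py_alt
  by_cases hg : pattern = [] ∨ arr.length < pattern.length
  · rw [if_pos hg, if_pos hg]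
  · rw [if_neg hg, if_neg hg]
    have hp : pattern ≠ [] := fun h => hg (Or.inl h)
    have hn : pattern.length ≤ arr.length := Nat.le_of_not_lt (fun h => hg (Or.inr h))
    have hm : 0 < pattern.length := List.length_pos_iff.mpr hp
    have hlps := pvBuildLps_ok pattern hm
    have hscan := pvScan_eq pattern (pvBuildLps pattern) hm hlps arr [] []
    simp only [List.length_nil, pvM_nil hp, List.nil_append] at hscan
    rw [hscan, pvG_eq pattern arr arr [] rfl]
    simp only [List.length_nil, PySem.List.slice_natCast_add]
    rw [List.filterMap_congr (g := fun e =>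
      if pattern.length ≤ e + 1 ∧ (arr.drop (e + 1 - pattern.length)).take pattern.length = pattern
      then some ((e : Int) - (pattern.length : Int) + 1) else none)
      (by
        intro e he
        have he' : e < arr.length := by
          simp only [List.mem_range'_1] at he
          omega
        simp only [pv_cond_iff pattern arr hm e he'])]
    have hsplitrange : List.range' 0 arr.length
        = List.range' 0 (pattern.length - 1)
          ++ List.range' (pattern.length - 1) (arr.length - pattern.length + 1) := by
      have h2 : (pattern.length - 1) + (arr.length - pattern.length + 1) = arr.length := by omega
      have hx := List.range'_append (s := 0) (m := pattern.length - 1)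
        (n := arr.length - pattern.length + 1) (step := 1)
      rw [h2] at hx
      rw [← hx]
      simp
    rw [hsplitrange, List.filterMap_append]
    have hnil : (List.range' 0 (pattern.length - 1)).filterMap (fun e =>
        if pattern.length ≤ e + 1 ∧ (arr.drop (e + 1 - pattern.length)).take pattern.length = pattern
        then some ((e : Int) - (pattern.length : Int) + 1) else none) = [] := by
      rw [List.filterMap_eq_nil_iff]
      intro e he
      simp only [List.mem_range'_1] at he
      rw [if_neg (by omega)]
    rw [hnil, List.nil_append, List.range'_eq_map_range, List.filterMap_map]
    apply List.filterMap_congr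
    intro i hi
    simp only [Function.comp_apply]
    have h1 : pattern.length ≤ pattern.length - 1 + i + 1 := by omega
    have h2 : pattern.length - 1 + i + 1 - pattern.length = i := by omega
    have h3 : ((pattern.length - 1 + i : Nat) : Int) - (pattern.length : Int) + 1 = (i : Int) := by
      omega
    simp only [h1, h2, h3, true_and]

-- ===== VERDICT (by name: the statement is the Claim_ definition above) =====
theorem find_token_sequence_py_spec : Claim_equal_find_token_sequence_py := by
  intro pattern arr _
  unfold Spec_find_token_sequence_py
  exact pv_main pattern arr
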